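-- pv_equiv track=rewrite | github.com/ai-kmu/etc | algorithm/Basic_Class/문제풀이코드/03_Heap/더맵게_wooseong.py | solution
-- ===== SOURCE A (Python) =====
-- import heapq as hq
--
-- def solution(scoville, K):
--     # min heap 사용: 작은 거 두 개를 뽑기 위함
--     hq.heapify(scoville)
--
--     answer = 0
--     # 가장 작은 게 K보다 작고 heap에 두 개 이상 남았을 때
--     while (scoville[0] < K) and (len(scoville) >= 2):
--         # 작은 거 두 개 뽑고 섞기
--         first = hq.heappop(scoville)
--         second = hq.heappop(scoville)
--         new = first + 2 * second
--         answer += 1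
--         # 섞은 거 넣기
--         hq.heappush(scoville, new)
--
--     # 가장 작은 게 여태 K보다 작다 == 불가능하다
--     return -1 if scoville[0] < K else answer
-- ===== SOURCE B (Python) =====
-- def solution(scoville, K):
--     # Two-queue technique: sort once; the sorted originals form one ascending
--     # queue and the merge results, which come out in nondecreasing order, form
--     # a second ascending queue (append-only). The global minimum is always at
--     # one of the two cursors, so no heap and no re-insertion is needed.
--     base = sorted(scoville)
--     mixed = []
--     i = j = 0
--     answer = 0
--
--     def take_base():
--         return i < len(base) and (j == len(mixed) or base[i] <= mixed[j])
--
--     while True: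
--         m = base[i] if take_base() else mixed[j]
--         if m >= K:
--             return answer
--         if (len(base) - i) + (len(mixed) - j) < 2:
--             return -1
--         if take_base():
--             first = base[i]; i += 1
--         else:
--             first = mixed[j]; j += 1
--         if take_base():
--             second = base[i]; i += 1
--         else:
--             second = mixed[j]; j += 1
--         mixed.append(first + 2 * second)
--         answer += 1
-- ===== Notes on version B (the rewrite author's own statement) =====
-- stated objective: alternative
-- what changed: Replaces the heap simulation by the two-queue technique: sort once, keep the sorted originals and the (provably nondecreasing) merge results as two ascending cursor queues, and take each minimum from one of the two queue fronts, so no heap and no re-insertion into the pot is ever performed.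
import Mathlib
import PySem

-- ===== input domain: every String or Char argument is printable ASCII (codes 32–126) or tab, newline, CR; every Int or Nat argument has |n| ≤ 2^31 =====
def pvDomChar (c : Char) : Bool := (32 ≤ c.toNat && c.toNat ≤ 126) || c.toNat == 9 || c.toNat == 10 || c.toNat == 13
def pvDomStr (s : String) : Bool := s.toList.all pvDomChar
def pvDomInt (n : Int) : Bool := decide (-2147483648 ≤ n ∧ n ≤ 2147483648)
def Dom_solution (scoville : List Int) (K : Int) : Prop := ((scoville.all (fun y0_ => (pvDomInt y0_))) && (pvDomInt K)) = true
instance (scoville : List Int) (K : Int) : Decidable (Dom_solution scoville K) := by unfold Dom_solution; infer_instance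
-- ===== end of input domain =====

-- B replaces the heap by the two-queue technique: sort once, keep the sorted
-- originals and the merge results (produced in nondecreasing order) as two
-- ascending cursor queues; the minimum is always at one of the two fronts.
-- A mutates its argument in Python (heapify), B does not; the equivalence
-- proved here is about the RETURN value only.

-- ===== PORT A =====
-- The heap is modelled by its multiset of elements (a plain list):
-- heapify is the identity on the multiset, heappop extracts the minimum
-- (popMin scans for it, the heap's contract), heappush appends, and
-- scoville[0] of a heap is its minimum (min?).
def popMin : List Int → Option (Int × List Int)
  | [] => none
  | a :: rest =>
    match popMin rest with
    | none => some (a, [])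
    | some (m, r) => if a ≤ m then some (a, rest) else some (m, a :: r)

def solutionGo (K : Int) : Nat → List Int → Int → Int
  | 0, l, answer =>
      if (PySem.List.min? l (fun x => x)).getD 0 < K then -1 else answer
  | fuel + 1, l, answer =>
      if (PySem.List.min? l (fun x => x)).getD 0 < K ∧ 2 ≤ l.length then
        match popMin l with
        | some (first, l1) =>
          match popMin l1 with
          | some (second, l2) =>
              solutionGo K fuel (l2 ++ [first + 2 * second]) (answer + 1)
          | none => -1
        | none => -1
      else
        if (PySem.List.min? l (fun x => x)).getD 0 < K then -1 else answer

def solution (scoville : List Int) (K : Int) : Int :=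
  solutionGo K scoville.length scoville 0

-- ===== PORT B =====
-- take_base(): the next minimum sits at the base cursor (not the mixed one).
def takeBase (base mixed : List Int) (i j : Nat) : Bool :=
  decide (i < base.length) && (decide (j = mixed.length) || decide (base.getD i 0 ≤ mixed.getD j 0))

-- m = base[i] if take_base() else mixed[j]  (getD is exact while the read is
-- in range; the only out-of-range read is Python's IndexError on [], which
-- Pre_solution excludes)
def frontB (base mixed : List Int) (i j : Nat) : Int :=
  if takeBase base mixed i j then base.getD i 0 else mixed.getD j 0

-- one 'pop two smallest' cursor move: (value, i', j')
def stepB (base mixed : List Int) (i j : Nat) : Int × Nat × Nat :=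
  if takeBase base mixed i j then (base.getD i 0, i + 1, j) else (mixed.getD j 0, i, j + 1)

def altGo (K : Int) : Nat → List Int → List Int → Nat → Nat → Int → Int
  | 0, base, mixed, i, j, answer =>
      if frontB base mixed i j < K then -1 else answer
  | fuel + 1, base, mixed, i, j, answer =>
      if frontB base mixed i j < K then
        if (base.length - i) + (mixed.length - j) < 2 then -1
        else
          let s1 := stepB base mixed i j
          let s2 := stepB base mixed s1.2.1 s1.2.2
          altGo K fuel base (mixed ++ [s1.1 + 2 * s2.1]) s2.2.1 s2.2.2 (answer + 1)
      else answer

def solution_alt (scoville : List Int) (K : Int) : Int :=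
  altGo K scoville.length (PySem.List.sorted scoville (fun x => x)) [] 0 0 0

-- ===== PRECONDITION & SPEC =====
-- Pre_ excludes the empty list, on which both A and B raise IndexError.
def Pre_solution (scoville : List Int) (K : Int) : Prop := scoville ≠ []
instance (scoville : List Int) (K : Int) : Decidable (Pre_solution scoville K) := by
  unfold Pre_solution; infer_instance
def pvWitness_solution : List Int × Int := ([1, 2, 3, 9, 10, 12], 7)

def Spec_solution (scoville : List Int) (K : Int) (out : Int) : Prop := out = solution_alt scoville K
instance (scoville : List Int) (K : Int) (out : Int) : Decidable (Spec_solution scoville K out) := by unfold Spec_solution; infer_instance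

-- ===== CLAIM (what is proved, stated in full; the proofs are below) =====
def Claim_equal_solution : Prop := ∀ (scoville : List Int) (K : Int), Dom_solution scoville K → Pre_solution scoville K → Spec_solution scoville K (solution scoville K)

-- ===== LEMMAS AND PROOFS =====

-- The reference model both ports are compared against: the pot as one sorted
-- list, re-inserting each mix in order.
def insortB (x : Int) : List Int → List Int
  | [] => [x]
  | y :: rest => if y ≤ x then y :: insortB x rest else x :: y :: rest

def modelGo (K : Int) : Nat → List Int → Int → Int
  | 0, l, answer =>
      match l with
      | [] => -1
      | a :: _ => if a < K then -1 else answer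
  | fuel + 1, l, answer =>
      match l with
      | [] => -1
      | [a] => if a < K then -1 else answer
      | a :: b :: rest =>
          if a < K then
            modelGo K fuel (insortB (a + 2 * b) rest) (answer + 1)
          else answer

theorem popMin_none : ∀ {l : List Int}, popMin l = none → l = [] := by
  intro l h
  cases l with
  | nil => rfl
  | cons a rest =>
    cases hr : popMin rest with
    | none => simp [popMin, hr] at h
    | some p =>
      obtain ⟨m, r⟩ := p
      simp only [popMin, hr] at h
      split at h <;> simp_all

theorem popMin_perm : ∀ {l : List Int} {m : Int} {r : List Int},
    popMin l = some (m, r) → l.Perm (m :: r) := by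
  intro l
  induction l with
  | nil => intro m r h; simp [popMin] at h
  | cons a rest ih =>
    intro m r h
    cases hr : popMin rest with
    | none =>
      have : rest = [] := popMin_none hr
      subst this
      simp only [popMin, Option.some.injEq, Prod.mk.injEq] at h
      obtain ⟨rfl, rfl⟩ := h
      exact .refl _
    | some p =>
      obtain ⟨m', r'⟩ := p
      simp only [popMin, hr] at h
      split at h <;>
        simp only [Option.some.injEq, Prod.mk.injEq] at h <;>
        obtain ⟨rfl, rfl⟩ := h
      · exact .refl _
      · exact ((ih hr).cons a).trans (List.Perm.swap _ _ _)

theorem popMin_min : ∀ {l : List Int} {m : Int} {r : List Int},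
    popMin l = some (m, r) → ∀ x ∈ l, m ≤ x := by
  intro l
  induction l with
  | nil => intro m r h; simp [popMin] at h
  | cons a rest ih =>
    intro m r h x hx
    cases hr : popMin rest with
    | none =>
      have : rest = [] := popMin_none hr
      subst this
      simp only [popMin, Option.some.injEq, Prod.mk.injEq] at h
      obtain ⟨rfl, rfl⟩ := h
      simp at hx
      omega
    | some p =>
      obtain ⟨m', r'⟩ := p
      simp only [popMin, hr] at h
      have hmin' := ih hr
      split at h <;>
        simp only [Option.some.injEq, Prod.mk.injEq] at h <;>
        obtain ⟨rfl, rfl⟩ := h <;>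
        rcases List.mem_cons.mp hx with h | h
      · omega
      · exact le_trans (by assumption) (hmin' x h)
      · omega
      · exact hmin' x h

theorem popMin_isSome {l : List Int} (h : l ≠ []) :
    ∃ m r, popMin l = some (m, r) := by
  cases hx : popMin l with
  | none => exact absurd (popMin_none hx) h
  | some p => exact ⟨p.1, p.2, by simp⟩

-- popMin on a list permuted to a::t with a minimal extracts exactly a
theorem popMin_eq_min {l : List Int} {a : Int} {t : List Int}
    (hp : l.Perm (a :: t)) (hmin : ∀ y ∈ a :: t, a ≤ y) :
    ∃ r, popMin l = some (a, r) ∧ r.Perm t := by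
  have hne : l ≠ [] := by
    intro h; subst h; exact absurd hp.symm (by simp)
  obtain ⟨m, r, hm⟩ := popMin_isSome hne
  have hperm : l.Perm (m :: r) := popMin_perm hm
  have h1 : a ≤ m := hmin m (hp.mem_iff.mp (hperm.mem_iff.mpr List.mem_cons_self))
  have h2 : m ≤ a := popMin_min hm a (hp.mem_iff.mpr List.mem_cons_self)
  have hma : m = a := le_antisymm h2 h1
  subst hma
  exact ⟨r, hm, (hperm.symm.trans hp).cons_inv⟩

theorem insortB_perm (x : Int) (l : List Int) : (insortB x l).Perm (x :: l) := by
  induction l with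
  | nil => simp [insortB]
  | cons y rest ih =>
    simp only [insortB]
    split
    · exact (ih.cons y).trans (List.Perm.swap _ _ _)
    · exact List.Perm.refl _

theorem insortB_ne_nil (x : Int) (l : List Int) : insortB x l ≠ [] := by
  cases l with
  | nil => simp [insortB]
  | cons y rest => simp only [insortB]; split <;> simp

theorem insortB_sorted {l : List Int} (x : Int) (h : l.Pairwise (· ≤ ·)) :
    (insortB x l).Pairwise (· ≤ ·) := by
  induction l with
  | nil => simp [insortB]
  | cons y rest ih =>
    rw [List.pairwise_cons] at h
    simp only [insortB]
    split
    · rw [List.pairwise_cons]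
      refine ⟨?_, ih h.2⟩
      intro z hz
      rcases List.mem_cons.mp ((insortB_perm x rest).mem_iff.mp hz) with h' | h'
      · subst h'; assumption
      · exact h.1 z h'
    · rw [List.pairwise_cons]
      refine ⟨?_, List.pairwise_cons.mpr h⟩
      intro z hz
      rcases List.mem_cons.mp hz with h' | h'
      · subst h'; omega
      · exact le_trans (by omega) (h.1 z h')

-- the min of any list permuted to a sorted list a :: t is a
theorem min_of_perm_sorted {l : List Int} {a : Int} {t : List Int}
    (hp : l.Perm (a :: t)) (hs : (a :: t).Pairwise (· ≤ ·)) :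
    PySem.List.min? l (fun x => x) = some a := by
  cases hm : PySem.List.min? l (fun x => x) with
  | none =>
    have := (PySem.List.min?_eq_none_iff l (fun x => x)).mp hm
    subst this
    exact absurd hp.symm (by simp)
  | some m =>
    have hmem : m ∈ l := PySem.List.min?_mem hm
    have hmin : ∀ y ∈ l, m ≤ y := fun y hy => PySem.List.min?_isMin hm y hy
    have ham : a ∈ l := hp.mem_iff.mpr List.mem_cons_self
    have h1 : m ≤ a := hmin a ham
    have h2 : a ≤ m := by
      rcases List.mem_cons.mp (hp.mem_iff.mp hmem) with h | h
      · omega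
      · exact (List.pairwise_cons.mp hs).1 m h
    have : m = a := le_antisymm h1 h2
    rw [this]

-- ===== A = model =====
theorem go_eq (K : Int) : ∀ (fuel : Nat) (l s : List Int) (answer : Int),
    s ≠ [] → l.Perm s → s.Pairwise (· ≤ ·) →
    solutionGo K fuel l answer = modelGo K fuel s answer := by
  intro fuel
  induction fuel with
  | zero =>
    intro l s answer hne hp hs
    cases s with
    | nil => exact absurd rfl hne
    | cons a t =>
      have hmin := min_of_perm_sorted hp hs
      simp [solutionGo, modelGo, hmin]
  | succ fuel ih =>
    intro l s answer hne hp hs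
    cases s with
    | nil => exact absurd rfl hne
    | cons a t =>
      have hmin := min_of_perm_sorted hp hs
      have hlen : l.length = t.length + 1 := by simpa using hp.length_eq
      cases t with
      | nil =>
        simp only [solutionGo, modelGo, hmin, Option.getD_some]
        have hl1 : l.length = 1 := by simpa using hlen
        rw [if_neg (by omega : ¬ (a < K ∧ 2 ≤ l.length))]
      | cons b t' =>
        simp only [solutionGo, modelGo, hmin, Option.getD_some]
        by_cases hK : a < K
        · have hlen' : l.length = t'.length + 2 := by simpa using hlen
          rw [if_pos ⟨hK, by omega⟩, if_pos hK]
          have hlne : l ≠ [] := by intro h; subst h; simp at hlen'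
          obtain ⟨first, l1, h1⟩ := popMin_isSome hlne
          have hperm1 : l.Perm (first :: l1) := popMin_perm h1
          have hfirst : first = a := by
            have hmem : first ∈ l := hperm1.mem_iff.mpr List.mem_cons_self
            have ha1 : a ≤ first := by
              rcases List.mem_cons.mp (hp.mem_iff.mp hmem) with h | h
              · omega
              · exact (List.pairwise_cons.mp hs).1 first h
            have ha2 : first ≤ a :=
              popMin_min h1 a (hp.mem_iff.mpr List.mem_cons_self)
            omega
          subst hfirst
          have hl1 : l1.Perm (b :: t') := (hperm1.symm.trans hp).cons_inv
          have hl1ne : l1 ≠ [] := by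
            intro h; subst h; exact absurd hl1.symm (by simp)
          obtain ⟨second, l2, h2⟩ := popMin_isSome hl1ne
          have hperm2 : l1.Perm (second :: l2) := popMin_perm h2
          have hs' : (b :: t').Pairwise (· ≤ ·) := (List.pairwise_cons.mp hs).2
          have hsecond : second = b := by
            have hmem : second ∈ l1 := hperm2.mem_iff.mpr List.mem_cons_self
            have hb1 : b ≤ second := by
              rcases List.mem_cons.mp (hl1.mem_iff.mp hmem) with h | h
              · omega
              · exact (List.pairwise_cons.mp hs').1 second h
            have hb2 : second ≤ b :=
              popMin_min h2 b (hl1.mem_iff.mpr List.mem_cons_self)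
            omega
          subst hsecond
          have hl2 : l2.Perm t' := (hperm2.symm.trans hl1).cons_inv
          simp only [h1, h2]
          apply ih _ _ _ (insortB_ne_nil _ _)
          · exact (List.perm_append_comm.trans (by simp)).trans
              ((hl2.cons _).trans (insortB_perm _ _).symm)
          · exact insortB_sorted _ (List.pairwise_cons.mp hs').2
        · rw [if_neg (by omega : ¬ (a < K ∧ 2 ≤ l.length)), if_neg hK, if_neg hK]

-- ===== B = model =====
-- the bound invariant of the mixed queue: its last element is at most
-- first + 2*second of the rest of the pot
def Bnd (q1 q2 : List Int) : Prop :=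
  ∀ q2' x, q2 = q2' ++ [x] →
    ∀ m1 r1 m2 r2, popMin (q1 ++ q2') = some (m1, r1) → popMin r1 = some (m2, r2) →
      x ≤ m1 + 2 * m2

theorem getD_drop (l : List Int) (n : Nat) : l.getD n 0 = (l.drop n).headD 0 := by
  simp [List.getD_eq_getElem?_getD, List.headD_eq_head?_getD, List.head?_drop]

theorem drop_ne_nil_iff (l : List Int) (n : Nat) : l.drop n ≠ [] ↔ n < l.length := by
  rw [Ne, List.drop_eq_nil_iff]; omega

theorem takeBase_iff (base mixed : List Int) (i j : Nat) (hj : j ≤ mixed.length) :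
    takeBase base mixed i j = true ↔
      (base.drop i ≠ [] ∧ (mixed.drop j = [] ∨ (base.drop i).headD 0 ≤ (mixed.drop j).headD 0)) := by
  simp only [takeBase, Bool.and_eq_true, Bool.or_eq_true, decide_eq_true_eq,
    ← getD_drop, drop_ne_nil_iff, List.drop_eq_nil_iff]
  constructor
  · rintro ⟨h1, h2 | h2⟩
    · exact ⟨h1, Or.inl (by omega)⟩
    · exact ⟨h1, Or.inr h2⟩
  · rintro ⟨h1, h2 | h2⟩
    · exact ⟨h1, Or.inl (by omega)⟩
    · exact ⟨h1, Or.inr h2⟩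

-- popping the head of the chosen queue extracts the global minimum
theorem pop_left {q1 q2 : List Int} {a : Int} {t : List Int}
    (h1 : q1.Pairwise (· ≤ ·)) (h2 : q2.Pairwise (· ≤ ·))
    (hs : (a :: t).Pairwise (· ≤ ·)) (hp : (a :: t).Perm (q1 ++ q2))
    (hq1 : q1 ≠ []) (hle : q2 = [] ∨ q1.headD 0 ≤ q2.headD 0) :
    q1.headD 0 = a ∧ t.Perm (q1.tail ++ q2) := by
  obtain ⟨h, q1t, rfl⟩ := List.exists_cons_of_ne_nil hq1
  have hhmin : ∀ y ∈ (h :: q1t) ++ q2, h ≤ y := by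
    intro y hy
    rcases List.mem_append.mp hy with hy | hy
    · rcases List.mem_cons.mp hy with rfl | hy
      · omega
      · exact (List.pairwise_cons.mp h1).1 y hy
    · rcases hle with rfl | hle
      · simp at hy
      · cases q2 with
        | nil => simp at hy
        | cons c q2t =>
          simp only [List.headD_cons] at hle
          rcases List.mem_cons.mp hy with rfl | hy
          · exact hle
          · exact le_trans hle ((List.pairwise_cons.mp h2).1 y hy)
  have hha : h = a := by
    have h1' : a ≤ h := by
      have : h ∈ a :: t := hp.mem_iff.mpr (by simp)
      rcases List.mem_cons.mp this with rfl | hmem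
      · omega
      · exact (List.pairwise_cons.mp hs).1 h hmem
    have h2' : h ≤ a := hhmin a (hp.mem_iff.mp List.mem_cons_self)
    omega
  subst hha
  refine ⟨rfl, ?_⟩
  exact (hp.trans (List.Perm.refl _)).cons_inv

theorem pop_right {q1 q2 : List Int} {a : Int} {t : List Int}
    (h1 : q1.Pairwise (· ≤ ·)) (h2 : q2.Pairwise (· ≤ ·))
    (hs : (a :: t).Pairwise (· ≤ ·)) (hp : (a :: t).Perm (q1 ++ q2))
    (hc : ¬ (q1 ≠ [] ∧ (q2 = [] ∨ q1.headD 0 ≤ q2.headD 0))) :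
    q2.headD 0 = a ∧ t.Perm (q1 ++ q2.tail) := by
  have hq2 : q2 ≠ [] := by
    intro rfl
    rcases Decidable.em (q1 = []) with rfl | hq1
    · exact absurd hp.symm (by simp)
    · exact hc ⟨hq1, Or.inl rfl⟩
  obtain ⟨h, q2t, rfl⟩ := List.exists_cons_of_ne_nil hq2
  have hhmin : ∀ y ∈ q1 ++ h :: q2t, h ≤ y := by
    intro y hy
    rcases List.mem_append.mp hy with hy | hy
    · cases q1 with
      | nil => simp at hy
      | cons c q1t =>
        have hlt : h < c := by
          rcases Decidable.em (c ≤ h) with hch | hch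
          · exact absurd ⟨by simp, Or.inr (show (c :: q1t).headD 0 ≤ (h :: q2t).headD 0 from hch)⟩ hc
          · omega
        rcases List.mem_cons.mp hy with rfl | hy
        · omega
        · exact le_trans (le_of_lt hlt) ((List.pairwise_cons.mp h1).1 y hy)
    · rcases List.mem_cons.mp hy with rfl | hy
      · omega
      · exact (List.pairwise_cons.mp h2).1 y hy
  have hha : h = a := by
    have h1' : a ≤ h := by
      have : h ∈ a :: t := hp.mem_iff.mpr (by simp)
      rcases List.mem_cons.mp this with rfl | hmem
      · omega
      · exact (List.pairwise_cons.mp hs).1 h hmem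
    have h2' : h ≤ a := hhmin a (hp.mem_iff.mp List.mem_cons_self)
    omega
  subst hha
  exact ⟨rfl, (hp.trans List.perm_middle).cons_inv⟩

theorem frontB_eq_stepB (base mixed : List Int) (i j : Nat) :
    frontB base mixed i j = (stepB base mixed i j).1 := by
  unfold frontB stepB; split <;> rfl

-- one cursor pop extracts the head of the sorted model list
theorem stepB_pop {base mixed : List Int} {i j : Nat} {a : Int} {t : List Int}
    (hj : j ≤ mixed.length)
    (h1 : (base.drop i).Pairwise (· ≤ ·)) (h2 : (mixed.drop j).Pairwise (· ≤ ·))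
    (hs : (a :: t).Pairwise (· ≤ ·)) (hp : (a :: t).Perm (base.drop i ++ mixed.drop j)) :
    (stepB base mixed i j = (a, i + 1, j) ∧ i < base.length ∧
        t.Perm (base.drop (i + 1) ++ mixed.drop j))
    ∨ (stepB base mixed i j = (a, i, j + 1) ∧ j < mixed.length ∧
        t.Perm (base.drop i ++ mixed.drop (j + 1))) := by
  by_cases hc : takeBase base mixed i j = true
  · left
    obtain ⟨hq1, hle⟩ := (takeBase_iff base mixed i j hj).mp hc
    obtain ⟨hhd, hperm⟩ := pop_left h1 h2 hs hp hq1 hle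
    have hi : i < base.length := (drop_ne_nil_iff base i).mp hq1
    refine ⟨?_, hi, ?_⟩
    · unfold stepB
      rw [if_pos hc, ← getD_drop] at *
      rw [hhd]
    · rw [← List.tail_drop]; exact hperm
  · right
    have hnc : ¬ (base.drop i ≠ [] ∧ (mixed.drop j = [] ∨
        (base.drop i).headD 0 ≤ (mixed.drop j).headD 0)) :=
      fun p => hc ((takeBase_iff base mixed i j hj).mpr p)
    obtain ⟨hhd, hperm⟩ := pop_right h1 h2 hs hp hnc
    have hq2 : mixed.drop j ≠ [] := by
      intro h0
      rcases Decidable.em (base.drop i = []) with h0' | h0'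
      · rw [h0, h0'] at hp
        have := hp.length_eq
        simp at this
      · exact hnc ⟨h0', Or.inl h0⟩
    have hjlt : j < mixed.length := (drop_ne_nil_iff mixed j).mp hq2
    refine ⟨?_, hjlt, ?_⟩
    · unfold stepB
      rw [← getD_drop] at hhd
      rw [if_neg hc, hhd]
    · rw [← List.tail_drop]; exact hperm

theorem ne_nil_concat {α : Type} (l : List α) (h : l ≠ []) : ∃ l' a, l = l' ++ [a] := by
  rcases List.eq_nil_or_concat l with h' | ⟨l', a, h'⟩
  · exact absurd h' h
  · exact ⟨l', a, by simpa [List.concat_eq_append] using h'⟩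

-- after popping a and b, pushing a+2b keeps the mixed queue ascending and
-- re-establishes the invariant
theorem after_pops (base mixed : List Int) (i j i2 j2 : Nat) (a b : Int) (rest : List Int)
    (hj2 : j2 ≤ mixed.length) (hjle : j ≤ j2)
    (h12 : (mixed.drop j2).Pairwise (· ≤ ·))
    (hs : (a :: b :: rest).Pairwise (· ≤ ·))
    (hp : (a :: b :: rest).Perm (base.drop i ++ mixed.drop j))
    (hperm2 : rest.Perm (base.drop i2 ++ mixed.drop j2))
    (hbnd : Bnd (base.drop i) (mixed.drop j)) :
    ((mixed ++ [a + 2 * b]).drop j2).Pairwise (· ≤ ·) ∧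
    (insortB (a + 2 * b) rest).Perm (base.drop i2 ++ (mixed ++ [a + 2 * b]).drop j2) ∧
    Bnd (base.drop i2) ((mixed ++ [a + 2 * b]).drop j2) := by
  have hab : a ≤ b := (List.pairwise_cons.mp hs).1 b List.mem_cons_self
  have hbrest : ∀ y ∈ rest, b ≤ y := (List.pairwise_cons.mp hs.of_cons).1
  have harest : ∀ y ∈ b :: rest, a ≤ y := (List.pairwise_cons.mp hs).1
  have E1 : (mixed ++ [a + 2 * b]).drop j2 = mixed.drop j2 ++ [a + 2 * b] :=
    List.drop_append_of_le_length hj2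
  -- every element still in the mixed queue is at most the pushed value
  have hq2le : ∀ x ∈ mixed.drop j2, x ≤ a + 2 * b := by
    rcases Decidable.em (mixed.drop j2 = []) with h0 | h0
    · intro x hx; rw [h0] at hx; simp at hx
    · obtain ⟨q2', xl, hq2⟩ := ne_nil_concat _ h0
      have hxl_rest : xl ∈ rest := by
        refine hperm2.symm.mem_iff.mp (List.mem_append.mpr (Or.inr ?_))
        rw [hq2]; simp
      -- mixed.drop j = pre ++ q2' ++ [xl]
      have hdd : (mixed.drop j).drop (j2 - j) = mixed.drop j2 := by
        rw [List.drop_drop]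
        congr 1
        omega
      have hsplit : mixed.drop j = ((mixed.drop j).take (j2 - j) ++ q2') ++ [xl] := by
        rw [List.append_assoc, ← hq2, ← hdd]
        exact (List.take_append_drop _ _).symm
      -- the two smallest of the pot without xl are a and b
      have hQ : ((base.drop i ++ ((mixed.drop j).take (j2 - j) ++ q2')) ++ [xl]) =
          base.drop i ++ mixed.drop j := by
        conv_rhs => rw [hsplit]
        simp [List.append_assoc]
      have hchain : (xl :: (base.drop i ++ ((mixed.drop j).take (j2 - j) ++ q2'))).Perm
          (xl :: a :: b :: rest.erase xl) := by
        have e1 : (xl :: (base.drop i ++ ((mixed.drop j).take (j2 - j) ++ q2'))).Perm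
            ((base.drop i ++ ((mixed.drop j).take (j2 - j) ++ q2')) ++ [xl]) :=
          (List.perm_append_singleton _ _).symm
        have e2 : ((base.drop i ++ ((mixed.drop j).take (j2 - j) ++ q2')) ++ [xl]).Perm
            (a :: b :: rest) := by rw [hQ]; exact hp.symm
        have e3 : (a :: b :: rest).Perm (a :: b :: xl :: rest.erase xl) :=
          ((List.perm_cons_erase hxl_rest).cons b).cons a
        have e4 : (a :: b :: xl :: rest.erase xl).Perm (xl :: a :: b :: rest.erase xl) :=
          ((List.Perm.swap xl b _).cons a).trans (List.Perm.swap xl a _)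
        exact ((e1.trans e2).trans e3).trans e4
      have QP : (base.drop i ++ ((mixed.drop j).take (j2 - j) ++ q2')).Perm
          (a :: b :: rest.erase xl) := hchain.cons_inv
      have hmin1 : ∀ y ∈ a :: b :: rest.erase xl, a ≤ y := by
        intro y hy
        rcases List.mem_cons.mp hy with rfl | hy
        · omega
        · rcases List.mem_cons.mp hy with rfl | hy
          · omega
          · exact le_trans hab (hbrest y (List.erase_subset hy))
      obtain ⟨r1, hQ1, hr1⟩ := popMin_eq_min QP hmin1
      have hmin2 : ∀ y ∈ b :: rest.erase xl, b ≤ y := by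
        intro y hy
        rcases List.mem_cons.mp hy with rfl | hy
        · omega
        · exact hbrest y (List.erase_subset hy)
      obtain ⟨r2, hQ2, _⟩ := popMin_eq_min hr1 hmin2
      have hxl_le : xl ≤ a + 2 * b := hbnd _ _ hsplit a r1 b r2 hQ1 hQ2
      intro x hx
      rw [hq2] at hx h12
      rcases List.mem_append.mp hx with hx | hx
      · have : x ≤ xl := by
          rcases List.pairwise_append.mp h12 with ⟨_, _, hcross⟩
          exact hcross x hx xl (by simp)
        omega
      · simp at hx; omega
  refine ⟨?_, ?_, ?_⟩
  · rw [E1]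
    refine List.pairwise_append.mpr ⟨h12, by simp, ?_⟩
    intro x hx y hy
    simp only [List.mem_singleton] at hy
    subst hy
    exact hq2le x hx
  · rw [E1, ← List.append_assoc]
    exact (insortB_perm _ _).trans
      ((hperm2.cons _).trans (List.perm_append_singleton _ _).symm)
  · intro q2' x heq m1 r1 m2 r2 hm1 hm2
    rw [E1] at heq
    obtain ⟨hq2'', hx⟩ := List.append_inj' heq (by simp)
    have hxv : x = a + 2 * b := by simpa using hx.symm
    subst hxv
    subst hq2''
    have hm1mem : m1 ∈ rest :=
      hperm2.symm.mem_iff.mp ((popMin_perm hm1).mem_iff.mpr List.mem_cons_self)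
    have hm2mem : m2 ∈ rest := by
      refine hperm2.symm.mem_iff.mp ((popMin_perm hm1).mem_iff.mpr ?_)
      exact List.mem_cons_of_mem _ ((popMin_perm hm2).mem_iff.mpr List.mem_cons_self)
    have h1' : b ≤ m1 := hbrest m1 hm1mem
    have h2' : b ≤ m2 := hbrest m2 hm2mem
    omega

theorem alt_eq_model (K : Int) : ∀ (fuel : Nat) (base mixed : List Int) (i j : Nat)
    (ans : Int) (l : List Int),
    i ≤ base.length → j ≤ mixed.length →
    (base.drop i).Pairwise (· ≤ ·) → (mixed.drop j).Pairwise (· ≤ ·) →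
    l ≠ [] → l.Pairwise (· ≤ ·) → l.Perm (base.drop i ++ mixed.drop j) →
    Bnd (base.drop i) (mixed.drop j) →
    altGo K fuel base mixed i j ans = modelGo K fuel l ans := by
  intro fuel
  induction fuel with
  | zero =>
    intro base mixed i j ans l hi hj h1 h2 hne hs hp hbnd
    obtain ⟨a, t, rfl⟩ := List.exists_cons_of_ne_nil hne
    have hfront : frontB base mixed i j = a := by
      rcases stepB_pop hj h1 h2 hs hp with ⟨he, _, _⟩ | ⟨he, _, _⟩ <;>
        rw [frontB_eq_stepB, he]
    simp only [altGo, modelGo, hfront]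
  | succ fuel ih =>
    intro base mixed i j ans l hi hj h1 h2 hne hs hp hbnd
    obtain ⟨a, t, rfl⟩ := List.exists_cons_of_ne_nil hne
    have hfront : frontB base mixed i j = a := by
      rcases stepB_pop hj h1 h2 hs hp with ⟨he, _, _⟩ | ⟨he, _, _⟩ <;>
        rw [frontB_eq_stepB, he]
    have hlen : (a :: t).length = (base.drop i).length + (mixed.drop j).length := by
      simpa using hp.length_eq
    simp only [List.length_drop, List.length_cons] at hlen
    cases t with
    | nil =>
      -- one element left: the size guard fails on the B side
      have hlt : (base.length - i) + (mixed.length - j) < 2 := by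
        simp only [List.length_nil] at hlen; omega
      simp only [altGo, modelGo, hfront]
      by_cases hK : a < K
      · rw [if_pos hK, if_pos hK, if_pos hlt]
      · rw [if_neg hK, if_neg hK]
    | cons b rest =>
      have hsz : ¬ ((base.length - i) + (mixed.length - j) < 2) := by
        simp only [List.length_cons] at hlen; omega
      by_cases hK : a < K
      · simp only [altGo, modelGo, hfront, if_pos hK, if_neg hsz]
        have hstail : (b :: rest).Pairwise (· ≤ ·) := hs.of_cons
        have hreststail : rest.Pairwise (· ≤ ·) := hstail.of_cons
        rcases stepB_pop hj h1 h2 hs hp with ⟨he1, hi1, hperm1⟩ | ⟨he1, hj1, hperm1⟩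
        · -- first pop from base
          have h11 : (base.drop (i + 1)).Pairwise (· ≤ ·) := by
            rw [← List.tail_drop]; exact h1.sublist (List.tail_sublist _)
          rcases stepB_pop hj h11 h2 hstail hperm1 with ⟨he2, hi2, hperm2⟩ | ⟨he2, hj2, hperm2⟩
          · obtain ⟨hpw, hpm, hbnd'⟩ := after_pops base mixed i j (i + 2) j a b rest
              hj (le_refl j) h2 hs hp (by simpa using hperm2) hbnd
            simp only [he1, he2]
            refine ih base (mixed ++ [a + 2 * b]) (i + 2) j (ans + 1) _
              (by omega) (by simp; omega) ?_ hpw (insortB_ne_nil _ _)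
              (insortB_sorted _ hreststail) hpm hbnd'
            rw [← List.tail_drop]; exact h11.sublist (List.tail_sublist _)
          · have h21 : (mixed.drop (j + 1)).Pairwise (· ≤ ·) := by
              rw [← List.tail_drop]; exact h2.sublist (List.tail_sublist _)
            obtain ⟨hpw, hpm, hbnd'⟩ := after_pops base mixed i j (i + 1) (j + 1) a b rest
              (by omega) (by omega) h21 hs hp hperm2 hbnd
            simp only [he1, he2]
            exact ih base (mixed ++ [a + 2 * b]) (i + 1) (j + 1) (ans + 1) _
              (by omega) (by simp; omega) h11 hpw (insortB_ne_nil _ _)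
              (insortB_sorted _ hreststail) hpm hbnd'
        · -- first pop from mixed
          have h21 : (mixed.drop (j + 1)).Pairwise (· ≤ ·) := by
            rw [← List.tail_drop]; exact h2.sublist (List.tail_sublist _)
          rcases stepB_pop (by omega : j + 1 ≤ mixed.length) h1 h21 hstail hperm1 with
            ⟨he2, hi2, hperm2⟩ | ⟨he2, hj2, hperm2⟩
          · obtain ⟨hpw, hpm, hbnd'⟩ := after_pops base mixed i j (i + 1) (j + 1) a b rest
              (by omega) (by omega) h21 hs hp hperm2 hbnd
            simp only [he1, he2]
            refine ih base (mixed ++ [a + 2 * b]) (i + 1) (j + 1) (ans + 1) _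
              (by omega) (by simp; omega) ?_ hpw (insortB_ne_nil _ _)
              (insortB_sorted _ hreststail) hpm hbnd'
            rw [← List.tail_drop]; exact h1.sublist (List.tail_sublist _)
          · have h22 : (mixed.drop (j + 2)).Pairwise (· ≤ ·) := by
              rw [← List.tail_drop]; exact h21.sublist (List.tail_sublist _)
            obtain ⟨hpw, hpm, hbnd'⟩ := after_pops base mixed i j i (j + 2) a b rest
              (by omega) (by omega) h22 hs hp (by simpa using hperm2) hbnd
            simp only [he1, he2]
            exact ih base (mixed ++ [a + 2 * b]) i (j + 2) (ans + 1) _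
              (by omega) (by simp; omega) h1 hpw (insortB_ne_nil _ _)
              (insortB_sorted _ hreststail) hpm hbnd'
      · simp only [altGo, modelGo, hfront, if_neg hK]

-- ===== VERDICT (by name: the statement is the Claim_ definition above) =====
theorem solution_spec : Claim_equal_solution := by
  intro scoville K _ hpre
  unfold Spec_solution solution solution_alt
  have hperm : scoville.Perm (PySem.List.sorted scoville (fun x => x)) :=
    (PySem.List.sorted_perm scoville (fun x => x) false).symm
  have hsorted : (PySem.List.sorted scoville (fun x => x)).Pairwise (· ≤ ·) := by
    simpa using PySem.List.sorted_pairwise scoville (fun x => x)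
  have hne : PySem.List.sorted scoville (fun x => x) ≠ [] := by
    intro h
    exact hpre (List.Perm.eq_nil (h ▸ hperm))
  rw [go_eq K scoville.length scoville _ 0 hne hperm hsorted]
  rw [show scoville.length = (PySem.List.sorted scoville (fun x => x)).length from
        hperm.length_eq]
  refine (alt_eq_model K _ _ [] 0 0 0 _ (by simp) (by simp) (by simpa using hsorted)
    (by simp) hne hsorted (by simp) ?_).symm
  intro q2' x hx
  have := congrArg List.length hx
  simp at this
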